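-- pv_equiv track=rewrite | github.com/centre-for-humanities-computing/Meme-to-text | TextExtractor.py | order_boxes
-- ===== SOURCE A (Python) =====
-- def order_boxes(boxes):
--     ''' method that orders boxes in a left-to-right, top-to-bottom
--         approach. This has it's faults when it comes to memes,
--         but generally is a safe-approach.
--     '''
--     boxes.sort(key=lambda b: b[1])
--     # initially the line bottom is set to be the bottom of the first rect
--     line_bottom = boxes[0][1]+boxes[0][3]-1
--     line_begin_idx = 0
--     for i in range(len(boxes)):
--         # when a new box's top is below current line's bottom
--         # it's a new line
--         if boxes[i][1] > line_bottom:
--             # sort the previous line by their x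
--             boxes[line_begin_idx:i] = sorted(boxes[line_begin_idx:i], key=lambda b: b[0])
--             line_begin_idx = i
--         # regardless if it's a new line or not
--         # always update the line bottom
--         line_bottom = max(boxes[i][1]+boxes[i][3]-1, line_bottom)
--     # sort the last line
--     boxes[line_begin_idx:] = sorted(boxes[line_begin_idx:], key=lambda b: b[0])
--     return boxes
-- ===== SOURCE B (Python) =====
-- def order_boxes(boxes):
--     ''' same ordering, by one global composite-key sort: label each box with its
--         line number in a single pass, then stable-sort once by (line, x). '''
--     boxes.sort(key=lambda b: b[1])
--     line = 0
--     line_bottom = boxes[0][1] + boxes[0][3] - 1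
--     labeled = []
--     for b in boxes:
--         if b[1] > line_bottom:
--             line += 1
--         line_bottom = max(b[1] + b[3] - 1, line_bottom)
--         labeled.append((line, b))
--     boxes[:] = [b for _, b in sorted(labeled, key=lambda p: (p[0], p[1][0]))]
--     return boxes
-- ===== Notes on version B (the rewrite author's own statement) =====
-- stated objective: alternative
-- what changed: A re-sorts each detected line in place via repeated slice assignments; B labels every box with its line number in one pass and then performs a single stable sort by the composite key (line, x).
import Mathlib
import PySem

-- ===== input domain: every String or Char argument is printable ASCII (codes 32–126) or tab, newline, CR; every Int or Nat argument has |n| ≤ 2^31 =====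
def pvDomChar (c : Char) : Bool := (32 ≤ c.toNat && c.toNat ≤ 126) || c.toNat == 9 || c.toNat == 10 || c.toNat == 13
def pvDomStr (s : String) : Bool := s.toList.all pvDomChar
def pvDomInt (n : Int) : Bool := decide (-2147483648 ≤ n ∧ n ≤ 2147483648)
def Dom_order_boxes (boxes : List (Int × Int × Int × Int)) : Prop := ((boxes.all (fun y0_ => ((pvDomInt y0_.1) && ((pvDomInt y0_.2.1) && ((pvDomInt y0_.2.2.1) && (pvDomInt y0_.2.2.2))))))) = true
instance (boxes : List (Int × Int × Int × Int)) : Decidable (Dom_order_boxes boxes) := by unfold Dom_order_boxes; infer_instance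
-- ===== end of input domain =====

-- B replaces A's repeated in-place slice-sorts by one line-labeling pass plus a single
-- stable sort by the composite key (line, x): a different decomposition, same cost class.
-- Both Pythons mutate `boxes` in place identically (sort + slice assignment); the theorems
-- are about the returned value.

-- ===== PORT A =====
-- one iteration of A's `for i in range(len(boxes))` loop; state = (boxes, line_bottom, line_begin_idx)
def stepA (acc : List (Int × Int × Int × Int) × Int × Int) (i : Int) :
    List (Int × Int × Int × Int) × Int × Int :=
  let cur := acc.1
  let bottom := acc.2.1
  let lbegin := acc.2.2
  let bi := PySem.List.pyGetD cur i (0, 0, 0, 0)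
  let s :=
    if bi.2.1 > bottom then
      -- boxes[line_begin_idx:i] = sorted(boxes[line_begin_idx:i], key=lambda b: b[0]); line_begin_idx = i
      (PySem.List.slice cur none (some lbegin) ++
         PySem.List.sorted (PySem.List.slice cur (some lbegin) (some i)) (fun b => b.1) false ++
         PySem.List.slice cur (some i) none, i)
    else (cur, lbegin)
  (s.1, max (bi.2.1 + bi.2.2.2 - 1) bottom, s.2)

def order_boxes (boxes : List (Int × Int × Int × Int)) : List (Int × Int × Int × Int) :=
  let ys := PySem.List.sorted boxes (fun b => b.2.1) false
  let b0 := PySem.List.pyGetD ys 0 (0, 0, 0, 0)   -- boxes[0]; IndexError on [] is excluded by Pre_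
  let st := (PySem.List.pyRange 0 (ys.length : Int) 1).foldl stepA (ys, b0.2.1 + b0.2.2.2 - 1, 0)
  -- boxes[line_begin_idx:] = sorted(boxes[line_begin_idx:], key=lambda b: b[0]); return boxes
  PySem.List.slice st.1 none (some st.2.2) ++
    PySem.List.sorted (PySem.List.slice st.1 (some st.2.2) none) (fun b => b.1) false

-- ===== PORT B =====
-- one iteration of B's labeling loop; state = (labeled, line, line_bottom)
def stepB (acc : List (Int × (Int × Int × Int × Int)) × Int × Int) (b : Int × Int × Int × Int) :
    List (Int × (Int × Int × Int × Int)) × Int × Int :=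
  let line := if b.2.1 > acc.2.2 then acc.2.1 + 1 else acc.2.1
  let bottom := max (b.2.1 + b.2.2.2 - 1) acc.2.2
  (acc.1 ++ [(line, b)], line, bottom)

def order_boxes_alt (boxes : List (Int × Int × Int × Int)) : List (Int × Int × Int × Int) :=
  let ys := PySem.List.sorted boxes (fun b => b.2.1) false
  let b0 := PySem.List.pyGetD ys 0 (0, 0, 0, 0)   -- boxes[0]; IndexError on [] is excluded by Pre_
  let st := ys.foldl stepB ([], 0, b0.2.1 + b0.2.2.2 - 1)
  (PySem.List.sorted2 st.1 (fun p => p.1) (fun p => p.2.1) false).map (fun p => p.2)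

-- ===== PRECONDITION & SPEC =====
-- Pre_ excludes only the empty list, on which A (and B) raise IndexError at boxes[0].
def Pre_order_boxes (boxes : List (Int × Int × Int × Int)) : Prop := boxes ≠ []
instance (boxes : List (Int × Int × Int × Int)) : Decidable (Pre_order_boxes boxes) := by
  unfold Pre_order_boxes; infer_instance

def pvWitness_order_boxes : (List (Int × Int × Int × Int)) := [(0, 0, 1, 1)]

def Spec_order_boxes (boxes : List (Int × Int × Int × Int)) (out : List (Int × Int × Int × Int)) : Prop := out = order_boxes_alt boxes
instance (boxes : List (Int × Int × Int × Int)) (out : List (Int × Int × Int × Int)) : Decidable (Spec_order_boxes boxes out) := by unfold Spec_order_boxes; infer_instance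

-- ===== CLAIM (what is proved, stated in full; the proofs are below) =====
def Claim_equal_order_boxes : Prop := ∀ (boxes : List (Int × Int × Int × Int)), Dom_order_boxes boxes → Pre_order_boxes boxes → Spec_order_boxes boxes (order_boxes boxes)

-- ===== LEMMAS AND PROOFS =====

-- common reference function: scan the y-sorted list, flushing each finished line sorted by x
def goLines : List (Int × Int × Int × Int) → List (Int × Int × Int × Int) → Int →
    List (Int × Int × Int × Int)
  | pend, [], _ => PySem.List.sorted pend (fun b => b.1) false
  | pend, b :: t, bottom =>
    if b.2.1 > bottom then
      PySem.List.sorted pend (fun b => b.1) false ++ goLines [b] t (max (b.2.1 + b.2.2.2 - 1) bottom)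
    else goLines (pend ++ [b]) t (max (b.2.1 + b.2.2.2 - 1) bottom)

-- the line labels B's pass attaches, as a recursion
def labelScan : List (Int × Int × Int × Int) → Int → Int → List (Int × (Int × Int × Int × Int))
  | [], _, _ => []
  | b :: t, line, bottom =>
    let line' := if b.2.1 > bottom then line + 1 else line
    (line', b) :: labelScan t line' (max (b.2.1 + b.2.2.2 - 1) bottom)

def finishA (st : List (Int × Int × Int × Int) × Int × Int) : List (Int × Int × Int × Int) :=
  PySem.List.slice st.1 none (some st.2.2) ++
    PySem.List.sorted (PySem.List.slice st.1 (some st.2.2) none) (fun b => b.1) false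

lemma pyRange_self (n : Int) : PySem.List.pyRange n n 1 = [] := by
  simp [PySem.List.pyRange]

lemma getD_mid (out rest : List (Int × Int × Int × Int)) (b : Int × Int × Int × Int) :
    PySem.List.pyGetD (out ++ (b :: rest)) ((out.length : Nat) : Int) (0, 0, 0, 0) = b := by
  rw [PySem.List.pyGetD_natCast]
  simp [List.getD_eq_getElem?_getD]

lemma slice_prefix (out rest : List (Int × Int × Int × Int)) :
    PySem.List.slice (out ++ rest) none (some ((out.length : Nat) : Int)) = out := by
  rw [PySem.List.slice_to _ (by positivity)]
  simp

lemma slice_mid (out pend rest : List (Int × Int × Int × Int)) :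
    PySem.List.slice (out ++ (pend ++ rest)) (some ((out.length : Nat) : Int))
        (some (((out.length + pend.length : Nat)) : Int)) = pend := by
  rw [PySem.List.slice_natCast]
  simp

lemma slice_suffix (out rest : List (Int × Int × Int × Int)) :
    PySem.List.slice (out ++ rest) (some ((out.length : Nat) : Int)) none = rest := by
  rw [PySem.List.slice_from _ (by positivity)]
  simp

lemma A_loop (rest : List (Int × Int × Int × Int)) :
    ∀ (out pend : List (Int × Int × Int × Int)) (bottom : Int),
    finishA ((PySem.List.pyRange ((out.length + pend.length : Nat) : Int)
          ((out.length + pend.length + rest.length : Nat) : Int) 1).foldl stepA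
        (out ++ pend ++ rest, bottom, ((out.length : Nat) : Int)))
      = out ++ goLines pend rest bottom := by
  induction rest with
  | nil =>
    intro out pend bottom
    rw [List.length_nil, Nat.add_zero, pyRange_self, List.foldl_nil]
    simp only [finishA, goLines]
    rw [List.append_nil, slice_prefix out pend, slice_suffix out pend]
  | cons b t ih =>
    intro out pend bottom
    have hlt : ((out.length + pend.length : Nat) : Int) < ((out.length + pend.length + (b :: t).length : Nat) : Int) := by
      simp
    rw [PySem.List.pyRange_one_cons hlt, List.foldl_cons]
    have hget : PySem.List.pyGetD (out ++ pend ++ (b :: t)) ((out.length + pend.length : Nat) : Int) (0, 0, 0, 0) = b := by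
      have h := getD_mid (out ++ pend) t b
      rw [List.length_append] at h
      exact h
    by_cases hb : b.2.1 > bottom
    · -- new line: sort boxes[begin:i], begin := i
      have hstep : stepA (out ++ pend ++ (b :: t), bottom, ((out.length : Nat) : Int)) ((out.length + pend.length : Nat) : Int)
          = ((out ++ PySem.List.sorted pend (fun b => b.1) false) ++ ([b] ++ t),
             max (b.2.1 + b.2.2.2 - 1) bottom, ((out.length + pend.length : Nat) : Int)) := by
        have hs1 : PySem.List.slice (out ++ pend ++ (b :: t)) none (some ((out.length : Nat) : Int)) = out := by
          rw [List.append_assoc]; exact slice_prefix out (pend ++ (b :: t))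
        have hs2 : PySem.List.slice (out ++ pend ++ (b :: t)) (some ((out.length : Nat) : Int)) (some ((out.length + pend.length : Nat) : Int)) = pend := by
          rw [List.append_assoc]; exact slice_mid out pend (b :: t)
        have hs3 : PySem.List.slice (out ++ pend ++ (b :: t)) (some ((out.length + pend.length : Nat) : Int)) none = b :: t := by
          have h := slice_suffix (out ++ pend) (b :: t)
          rw [List.length_append] at h
          exact h
        simp only [stepA, hget, if_pos hb, hs1, hs2, hs3]
        simp
      rw [hstep]
      have hlen : (out ++ PySem.List.sorted pend (fun b => b.1) false).length = out.length + pend.length := by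
        rw [List.length_append, PySem.List.length_sorted]
      have e2 : ((out.length + pend.length : Nat) : Int) + 1
          = (((out ++ PySem.List.sorted pend (fun b => b.1) false).length + [b].length : Nat) : Int) := by
        rw [hlen]; simp only [List.length_cons, List.length_nil]; push_cast; omega
      have e3 : ((out.length + pend.length + (b :: t).length : Nat) : Int)
          = (((out ++ PySem.List.sorted pend (fun b => b.1) false).length + [b].length + t.length : Nat) : Int) := by
        rw [hlen]; simp only [List.length_cons, List.length_nil]; push_cast; omega
      have e4 : ((out.length + pend.length : Nat) : Int) = (((out ++ PySem.List.sorted pend (fun b => b.1) false).length : Nat) : Int) := by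
        rw [hlen]
      rw [e2, e3, e4, ← List.append_assoc, ih]
      simp [goLines, hb]
    · -- same line
      have hstep : stepA (out ++ pend ++ (b :: t), bottom, ((out.length : Nat) : Int)) ((out.length + pend.length : Nat) : Int)
          = (out ++ (pend ++ [b]) ++ t, max (b.2.1 + b.2.2.2 - 1) bottom, ((out.length : Nat) : Int)) := by
        simp only [stepA, hget, if_neg hb]
        simp
      rw [hstep]
      have e2 : ((out.length + pend.length : Nat) : Int) + 1 = ((out.length + (pend ++ [b]).length : Nat) : Int) := by
        rw [List.length_append (as := pend) (bs := [b])]; simp only [List.length_cons, List.length_nil]; push_cast; omega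
      have e3 : ((out.length + pend.length + (b :: t).length : Nat) : Int) = ((out.length + (pend ++ [b]).length + t.length : Nat) : Int) := by
        rw [List.length_append (as := pend) (bs := [b])]; simp only [List.length_cons, List.length_nil]; push_cast; omega
      rw [e2, e3, ih]
      simp [goLines, hb]

lemma labelScan_ge (rest : List (Int × Int × Int × Int)) :
    ∀ (line bottom : Int), ∀ p ∈ labelScan rest line bottom, line ≤ p.1 := by
  induction rest with
  | nil => intro line bottom p hp; simp [labelScan] at hp
  | cons b t ih =>
    intro line bottom p hp
    simp only [labelScan, List.mem_cons] at hp
    rcases hp with h | h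
    · subst h; split_ifs <;> simp
    · have := ih _ _ p h
      split_ifs at this <;> omega

lemma B_scan (rest : List (Int × Int × Int × Int)) :
    ∀ (acc : List (Int × (Int × Int × Int × Int))) (line bottom : Int),
    (rest.foldl stepB (acc, line, bottom)).1 = acc ++ labelScan rest line bottom := by
  induction rest with
  | nil => intro acc line bottom; simp [labelScan]
  | cons b t ih =>
    intro acc line bottom
    simp only [List.foldl_cons, labelScan, stepB]
    split_ifs with h <;> simp [ih]

lemma insertBy_append_right {α : Type} (before : α → α → Bool) (x : α) (s acc : List α)
    (h : ∀ y ∈ s, before x y = false) :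
    PySem.List.insertBy before x (s ++ acc) = s ++ PySem.List.insertBy before x acc := by
  induction s with
  | nil => simp
  | cons y ys ih =>
    have hy : before x y = false := h y (by simp)
    have step : PySem.List.insertBy before x (y :: (ys ++ acc)) = y :: PySem.List.insertBy before x (ys ++ acc) := by
      simp [PySem.List.insertBy, hy]
    simp only [List.cons_append, step, ih (fun z hz => h z (by simp [hz]))]

lemma foldl_insertBy_append {α : Type} (before : α → α → Bool) (l : List α) :
    ∀ (s acc : List α), (∀ x ∈ l, ∀ y ∈ s, before x y = false) →
    l.foldl (fun a x => PySem.List.insertBy before x a) (s ++ acc)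
      = s ++ l.foldl (fun a x => PySem.List.insertBy before x a) acc := by
  induction l with
  | nil => intro s acc _; simp
  | cons x t ih =>
    intro s acc h
    simp only [List.foldl_cons]
    rw [insertBy_append_right before x s acc (h x (by simp))]
    exact ih s _ (fun z hz y hy => h z (by simp [hz]) y hy)

lemma sorted2_append_split (l1 l2 : List (Int × (Int × Int × Int × Int)))
    (h : ∀ x ∈ l2, ∀ y ∈ l1, y.1 < x.1) :
    PySem.List.sorted2 (l1 ++ l2) (fun p => p.1) (fun p => p.2.1) false
      = PySem.List.sorted2 l1 (fun p => p.1) (fun p => p.2.1) false ++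
        PySem.List.sorted2 l2 (fun p => p.1) (fun p => p.2.1) false := by
  simp only [PySem.List.sorted2, if_neg (by simp : ¬ (false = true)), List.foldl_append]
  have hmem : ∀ y ∈ (l1.foldl (fun acc x =>
      PySem.List.insertBy (fun a b => decide (a.1 < b.1) || (!decide (b.1 < a.1) && decide (a.2.1 < b.2.1))) x acc) []), y ∈ l1 := by
    intro y hy
    have hp := PySem.List.sorted2_perm l1 (fun p => p.1) (fun p => p.2.1) false
    exact hp.mem_iff.mp (by simpa [PySem.List.sorted2] using hy)
  have := foldl_insertBy_append
    (fun a b : Int × (Int × Int × Int × Int) => decide (a.1 < b.1) || (!decide (b.1 < a.1) && decide (a.2.1 < b.2.1)))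
    l2 (l1.foldl (fun acc x => PySem.List.insertBy _ x acc) []) []
    (by
      intro x hx y hy
      have hlt := h x hx y (hmem y hy)
      simp [not_lt_of_gt hlt, hlt])
  simpa using this

lemma insertBy_const_fst (c : Int) (p : Int × (Int × Int × Int × Int))
    (acc : List (Int × (Int × Int × Int × Int))) (hp : p.1 = c) (h : ∀ q ∈ acc, q.1 = c) :
    (PySem.List.insertBy (fun a b => decide (a.1 < b.1) || (!decide (b.1 < a.1) && decide (a.2.1 < b.2.1))) p acc).map (fun q => q.2)
      = PySem.List.insertBy (fun a b => decide (a.1 < b.1)) p.2 (acc.map (fun q => q.2)) := by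
  induction acc with
  | nil => simp [PySem.List.insertBy]
  | cons q qs ih =>
    have hq : q.1 = c := h q (by simp)
    have hb : (decide (p.1 < q.1) || (!decide (q.1 < p.1) && decide (p.2.1 < q.2.1))) = decide (p.2.1 < q.2.1) := by
      simp [hp, hq]
    simp only [PySem.List.insertBy, hb]
    by_cases hx : p.2.1 < q.2.1
    · simp [PySem.List.insertBy, hx]
    · simp [PySem.List.insertBy, hx, ih (fun z hz => h z (by simp [hz]))]

lemma mem_insertBy_const (c : Int) (p : Int × (Int × Int × Int × Int))
    (acc : List (Int × (Int × Int × Int × Int))) (hp : p.1 = c) (h : ∀ q ∈ acc, q.1 = c) :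
    ∀ q ∈ PySem.List.insertBy (fun a b => decide (a.1 < b.1) || (!decide (b.1 < a.1) && decide (a.2.1 < b.2.1))) p acc, q.1 = c := by
  intro q hq
  rcases (PySem.List.mem_insertBy _ p q acc).mp hq with rfl | hq
  · exact hp
  · exact h q hq

lemma foldl_insertBy_const_fst (c : Int) (ps : List (Int × (Int × Int × Int × Int))) :
    ∀ (acc : List (Int × (Int × Int × Int × Int))), (∀ p ∈ ps, p.1 = c) → (∀ q ∈ acc, q.1 = c) →
    (ps.foldl (fun a x => PySem.List.insertBy (fun a b => decide (a.1 < b.1) || (!decide (b.1 < a.1) && decide (a.2.1 < b.2.1))) x a) acc).map (fun q => q.2)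
      = (ps.map (fun q => q.2)).foldl (fun a x => PySem.List.insertBy (fun a b => decide (a.1 < b.1)) x a) (acc.map (fun q => q.2)) := by
  induction ps with
  | nil => intro acc _ _; simp
  | cons p t ih =>
    intro acc hps hacc
    simp only [List.foldl_cons, List.map_cons]
    rw [← insertBy_const_fst c p acc (hps p (by simp)) hacc]
    exact ih _ (fun z hz => hps z (by simp [hz]))
      (mem_insertBy_const c p acc (hps p (by simp)) hacc)

lemma sorted2_const_fst (ps : List (Int × (Int × Int × Int × Int))) (c : Int)
    (h : ∀ p ∈ ps, p.1 = c) :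
    (PySem.List.sorted2 ps (fun p => p.1) (fun p => p.2.1) false).map (fun p => p.2)
      = PySem.List.sorted (ps.map (fun p => p.2)) (fun b => b.1) false := by
  simp only [PySem.List.sorted2, PySem.List.sorted, if_neg (by simp : ¬ (false = true))]
  simpa using foldl_insertBy_const_fst c ps [] h (by simp)

lemma B_main (rest : List (Int × Int × Int × Int)) :
    ∀ (pendP : List (Int × (Int × Int × Int × Int))) (line bottom : Int),
    (∀ p ∈ pendP, p.1 = line) →
    (PySem.List.sorted2 (pendP ++ labelScan rest line bottom)
        (fun p => p.1) (fun p => p.2.1) false).map (fun p => p.2)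
      = goLines (pendP.map (fun p => p.2)) rest bottom := by
  induction rest with
  | nil =>
    intro pendP line bottom h
    simp only [labelScan, List.append_nil, goLines]
    exact sorted2_const_fst pendP line h
  | cons b t ih =>
    intro pendP line bottom h
    by_cases hb : b.2.1 > bottom
    · -- new line
      have hls : labelScan (b :: t) line bottom
          = (line + 1, b) :: labelScan t (line + 1) (max (b.2.1 + b.2.2.2 - 1) bottom) := by
        simp [labelScan, hb]
      rw [hls]
      have hsplit := sorted2_append_split pendP
        ((line + 1, b) :: labelScan t (line + 1) (max (b.2.1 + b.2.2.2 - 1) bottom))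
        (by
          intro x hx y hy
          have hy1 : y.1 = line := h y hy
          rcases List.mem_cons.mp hx with rfl | hx
          · simp [hy1]
          · have := labelScan_ge t (line + 1) (max (b.2.1 + b.2.2.2 - 1) bottom) x hx
            omega)
      rw [hsplit, List.map_append]
      rw [sorted2_const_fst pendP line h]
      have hih := ih ([(line + 1, b)]) (line + 1) (max (b.2.1 + b.2.2.2 - 1) bottom) (by simp)
      simp only [List.singleton_append] at hih
      rw [hih]
      simp [goLines, hb]
    · -- same line
      have hls : labelScan (b :: t) line bottom
          = (line, b) :: labelScan t line (max (b.2.1 + b.2.2.2 - 1) bottom) := by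
        simp [labelScan, hb]
      rw [hls]
      have : pendP ++ (line, b) :: labelScan t line (max (b.2.1 + b.2.2.2 - 1) bottom)
          = (pendP ++ [(line, b)]) ++ labelScan t line (max (b.2.1 + b.2.2.2 - 1) bottom) := by
        simp
      rw [this]
      have hih := ih (pendP ++ [(line, b)]) line (max (b.2.1 + b.2.2.2 - 1) bottom)
        (by intro p hp; rcases List.mem_append.mp hp with hp | hp
            · exact h p hp
            · simp at hp; subst hp; rfl)
      rw [hih]
      simp [goLines, hb]


lemma A_eq_goLines (boxes : List (Int × Int × Int × Int)) :
    order_boxes boxes =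
      goLines [] (PySem.List.sorted boxes (fun b => b.2.1) false)
        ((PySem.List.pyGetD (PySem.List.sorted boxes (fun b => b.2.1) false) 0 (0, 0, 0, 0)).2.1 +
          (PySem.List.pyGetD (PySem.List.sorted boxes (fun b => b.2.1) false) 0 (0, 0, 0, 0)).2.2.2 - 1) := by
  have h := A_loop (PySem.List.sorted boxes (fun b => b.2.1) false) [] []
    ((PySem.List.pyGetD (PySem.List.sorted boxes (fun b => b.2.1) false) 0 (0, 0, 0, 0)).2.1 +
      (PySem.List.pyGetD (PySem.List.sorted boxes (fun b => b.2.1) false) 0 (0, 0, 0, 0)).2.2.2 - 1)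
  simp only [List.length_nil, Nat.add_zero, Nat.zero_add, Nat.cast_zero, List.nil_append,
    List.append_nil, finishA] at h
  simpa [order_boxes] using h

lemma B_eq_goLines (boxes : List (Int × Int × Int × Int)) :
    order_boxes_alt boxes =
      goLines [] (PySem.List.sorted boxes (fun b => b.2.1) false)
        ((PySem.List.pyGetD (PySem.List.sorted boxes (fun b => b.2.1) false) 0 (0, 0, 0, 0)).2.1 +
          (PySem.List.pyGetD (PySem.List.sorted boxes (fun b => b.2.1) false) 0 (0, 0, 0, 0)).2.2.2 - 1) := by
  have hscan := B_scan (PySem.List.sorted boxes (fun b => b.2.1) false) [] 0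
    ((PySem.List.pyGetD (PySem.List.sorted boxes (fun b => b.2.1) false) 0 (0, 0, 0, 0)).2.1 +
      (PySem.List.pyGetD (PySem.List.sorted boxes (fun b => b.2.1) false) 0 (0, 0, 0, 0)).2.2.2 - 1)
  have hmain := B_main (PySem.List.sorted boxes (fun b => b.2.1) false) [] 0
    ((PySem.List.pyGetD (PySem.List.sorted boxes (fun b => b.2.1) false) 0 (0, 0, 0, 0)).2.1 +
      (PySem.List.pyGetD (PySem.List.sorted boxes (fun b => b.2.1) false) 0 (0, 0, 0, 0)).2.2.2 - 1)
    (by intro p hp; simp at hp)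
  simp only [List.nil_append] at hscan hmain
  simp only [order_boxes_alt, hscan, hmain, List.map_nil]

-- ===== VERDICT (by name: the statement is the Claim_ definition above) =====
theorem order_boxes_spec : Claim_equal_order_boxes := by
  intro boxes _ _
  unfold Spec_order_boxes
  rw [A_eq_goLines, B_eq_goLines]
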